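-- pv_equiv track=rewrite | github.com/GeneralCorn/Origami | backend/services/agent.py | _walk_json_string
-- ===== SOURCE A (Python) =====
-- def _walk_json_string(text: str, start: int) -> tuple[str, int]:
--     """Walk from position *after* opening `"` and return (value, end_pos).
--
--     Handles LaTeX-polluted escaping: \\b/\\f followed by a letter are treated
--     as LaTeX (\\beta, \\frac) rather than backspace/form-feed.
--     """
--     i = start
--     chars: list[str] = []
--     while i < len(text):
--         ch = text[i]
--         if ch == '\\' and i + 1 < len(text):
--             nxt = text[i + 1]
--             if nxt == '"':   chars.append('"');  i += 2
--             elif nxt == '\\': chars.append('\\'); i += 2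
--             elif nxt == '/':  chars.append('/');  i += 2
--             elif nxt == 'n':  chars.append('\n'); i += 2
--             elif nxt == 'r':  chars.append('\r'); i += 2
--             elif nxt == 't':  chars.append('\t'); i += 2
--             elif nxt in ('b', 'f') and i + 2 < len(text) and text[i + 2].isalpha():
--                 # LaTeX (\beta, \frac) — keep the backslash + letter
--                 chars.append('\\'); chars.append(nxt); i += 2
--             elif nxt == 'b':  chars.append('\b'); i += 2
--             elif nxt == 'f':  chars.append('\f'); i += 2
--             else:
--                 # Unknown escape — keep as-is (LaTeX like \eta, \alpha …)
--                 chars.append('\\'); chars.append(nxt); i += 2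
--         elif ch == '"':
--             return ''.join(chars), i + 1
--         else:
--             chars.append(ch); i += 1
--     return ''.join(chars), i
-- ===== SOURCE B (Python) =====
-- def _walk_json_string(text: str, start: int) -> tuple[str, int]:
--     """Chunked scan: jump with str.find to the next '\\' or '"', copy the
--     intervening slice in one shot, then dispatch on the delimiter."""
--     n = len(text)
--     parts: list[str] = []
--     i = start
--     while i < n:
--         jb = text.find('\\', i)
--         jq = text.find('"', i)
--         if jb == -1:
--             j = jq
--         elif jq == -1:
--             j = jb
--         else:
--             j = min(jb, jq)
--         if j == -1:
--             parts.append(text[i:])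
--             i = n
--             continue
--         parts.append(text[i:j])
--         i = j
--         if text[i] == '"':
--             return ''.join(parts), i + 1
--         # delimiter is a backslash
--         if i + 1 < n:
--             nxt = text[i + 1]
--             if nxt in '"\\/':
--                 parts.append(nxt)
--             elif nxt == 'n':
--                 parts.append('\n')
--             elif nxt == 'r':
--                 parts.append('\r')
--             elif nxt == 't':
--                 parts.append('\t')
--             elif nxt in 'bf':
--                 if i + 2 < n and text[i + 2].isalpha():
--                     parts.append('\\' + nxt)   # LaTeX \beta / \frac
--                 else:
--                     parts.append('\b' if nxt == 'b' else '\f')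
--             else:
--                 parts.append('\\' + nxt)       # unknown escape, keep as-is
--             i += 2
--         else:
--             parts.append('\\')                 # trailing backslash
--             i += 1
--     return ''.join(parts), i
-- ===== Notes on version B (the rewrite author's own statement) =====
-- stated objective: faster
-- what changed: B replaces A's one-character-per-iteration copy loop with a chunked scan: str.find locates the next '\' or '"' delimiter and the whole intervening slice is appended in one shot, so only delimiters are dispatched on.
-- intended difference: For a negative in-range start on nonempty text A wraps each index, so it reads the tail of the string and then re-reads the string from the beginning, returning an accidentally duplicated value; B treats a negative start consistently with Python slicing and scans only text[start:], the intended reading of a start position. — e.g. on _walk_json_string("ab", -1): A returns ("bab", 2), B returns ("b", 2)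
import Mathlib
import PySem

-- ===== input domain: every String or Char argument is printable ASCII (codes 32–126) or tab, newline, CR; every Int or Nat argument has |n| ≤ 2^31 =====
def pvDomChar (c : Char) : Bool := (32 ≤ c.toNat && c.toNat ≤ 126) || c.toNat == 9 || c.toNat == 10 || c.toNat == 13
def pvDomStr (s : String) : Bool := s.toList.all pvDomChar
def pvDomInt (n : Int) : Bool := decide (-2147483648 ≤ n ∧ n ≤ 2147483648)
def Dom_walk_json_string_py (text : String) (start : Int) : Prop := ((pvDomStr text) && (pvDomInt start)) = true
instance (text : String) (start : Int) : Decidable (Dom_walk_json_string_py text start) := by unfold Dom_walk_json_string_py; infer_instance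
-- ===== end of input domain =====

-- B replaces A's char-by-char copy loop by a chunked scan (str.find to the next '\' or '"',
-- slice appended in one shot); on a negative in-range start B scans only text[start:] where A
-- accidentally wraps and re-reads (stated as D_), and B returns where A raises (start < -len).


-- ===== PORT A =====
-- fuel is only a totalization guard: (len - start).toNat + 1 always suffices, since i grows by ≥ 1.
def pvWalkA (t : List Char) (fuel : Nat) (i : Int) (acc : List Char) : List Char × Int :=
  match fuel with
  | 0 => (acc, i)
  | f + 1 =>
    if i < (t.length : Int) then
      let ch := PySem.List.pyGetD t i ' '
      if ch = '\\' ∧ i + 1 < (t.length : Int) then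
        let nxt := PySem.List.pyGetD t (i + 1) ' '
        if nxt = '"' then pvWalkA t f (i + 2) (acc ++ ['"'])
        else if nxt = '\\' then pvWalkA t f (i + 2) (acc ++ ['\\'])
        else if nxt = '/' then pvWalkA t f (i + 2) (acc ++ ['/'])
        else if nxt = 'n' then pvWalkA t f (i + 2) (acc ++ ['\n'])
        else if nxt = 'r' then pvWalkA t f (i + 2) (acc ++ ['\r'])
        else if nxt = 't' then pvWalkA t f (i + 2) (acc ++ ['\t'])
        else if (nxt = 'b' ∨ nxt = 'f') ∧ (i + 2 < (t.length : Int) ∧ PySem.Chars.isalpha (PySem.List.pyGetD t (i + 2) ' ') = true) then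
          pvWalkA t f (i + 2) (acc ++ ['\\', nxt])
        else if nxt = 'b' then pvWalkA t f (i + 2) (acc ++ ['\x08'])
        else if nxt = 'f' then pvWalkA t f (i + 2) (acc ++ ['\x0c'])
        else pvWalkA t f (i + 2) (acc ++ ['\\', nxt])
      else if ch = '"' then (acc, i + 1)
      else pvWalkA t f (i + 1) (acc ++ [ch])
    else (acc, i)

def walk_json_string_py (text : String) (start : Int) : String × Int :=
  let t := text.toList
  let r := pvWalkA t (((t.length : Int) - start).toNat + 1) start []
  (String.ofList r.1, r.2)

-- ===== PORT B =====
-- fuel is only a totalization guard: (len - start).toNat + 1 always suffices, since i grows by ≥ 1.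
def pvWalkB (t : List Char) (fuel : Nat) (i : Int) (acc : List Char) : List Char × Int :=
  match fuel with
  | 0 => (acc, i)
  | f + 1 =>
    if i < (t.length : Int) then
      let jb := PySem.Chars.findFrom t ['\\'] i none
      let jq := PySem.Chars.findFrom t ['"'] i none
      let j := if jb = -1 then jq else if jq = -1 then jb else min jb jq
      if j = -1 then (acc ++ PySem.List.slice t (some i) none, (t.length : Int))
      else
        let acc' := acc ++ PySem.List.slice t (some i) (some j)
        if PySem.List.pyGetD t j ' ' = '"' then (acc', j + 1)
        else if j + 1 < (t.length : Int) then
          let nxt := PySem.List.pyGetD t (j + 1) ' '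
          if nxt = '"' ∨ nxt = '\\' ∨ nxt = '/' then pvWalkB t f (j + 2) (acc' ++ [nxt])
          else if nxt = 'n' then pvWalkB t f (j + 2) (acc' ++ ['\n'])
          else if nxt = 'r' then pvWalkB t f (j + 2) (acc' ++ ['\r'])
          else if nxt = 't' then pvWalkB t f (j + 2) (acc' ++ ['\t'])
          else if nxt = 'b' ∨ nxt = 'f' then
            if j + 2 < (t.length : Int) ∧ PySem.Chars.isalpha (PySem.List.pyGetD t (j + 2) ' ') = true then
              pvWalkB t f (j + 2) (acc' ++ ['\\', nxt])
            else pvWalkB t f (j + 2) (acc' ++ [if nxt = 'b' then '\x08' else '\x0c'])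
          else pvWalkB t f (j + 2) (acc' ++ ['\\', nxt])
        else pvWalkB t f (j + 1) (acc' ++ ['\\'])
    else (acc, i)

def walk_json_string_py_alt (text : String) (start : Int) : String × Int :=
  let t := text.toList
  let r := pvWalkB t (((t.length : Int) - start).toNat + 1) start []
  (String.ofList r.1, r.2)

-- ===== PRECONDITION & SPEC =====
-- Pre_ excludes exactly the inputs where A raises IndexError (start < -len(text)).
def Pre_walk_json_string_py (text : String) (start : Int) : Prop :=
  -(PySem.Str.len text) ≤ start
instance (text : String) (start : Int) : Decidable (Pre_walk_json_string_py text start) := by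
  unfold Pre_walk_json_string_py; infer_instance

def pvWitness_walk_json_string_py : String × Int := ("ab", 0)

-- For a negative in-range start on nonempty text, A wraps each index, so it reads the tail of
-- the string and then re-reads the string from the beginning, returning an accidentally
-- duplicated value; B treats the negative start consistently with Python slicing and scans
-- only text[start:], the intended reading of a start position.
def D_walk_json_string_py (text : String) (start : Int) : Prop :=
  start < 0 ∧ 0 < PySem.Str.len text
instance (text : String) (start : Int) : Decidable (D_walk_json_string_py text start) := by
  unfold D_walk_json_string_py; infer_instance

def Spec_walk_json_string_py (text : String) (start : Int) (out : String × Int) : Prop :=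
  ¬ D_walk_json_string_py text start → out = walk_json_string_py_alt text start
instance (text : String) (start : Int) (out : String × Int) : Decidable (Spec_walk_json_string_py text start out) := by
  unfold Spec_walk_json_string_py; infer_instance

def pvDiffWitness_walk_json_string_py : String × Int := ("ab", -1)
def pvDiffWitnessOut_walk_json_string_py : (String × Int) × (String × Int) := (("bab", 2), ("b", 2))

-- ===== CLAIM (what is proved, stated in full; the proofs are below) =====
def Claim_unchanged_walk_json_string_py : Prop := ∀ (text : String) (start : Int), Dom_walk_json_string_py text start → Pre_walk_json_string_py text start → Spec_walk_json_string_py text start (walk_json_string_py text start)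
def Claim_changed_walk_json_string_py : Prop := Dom_walk_json_string_py (pvDiffWitness_walk_json_string_py.1) (pvDiffWitness_walk_json_string_py.2) ∧ Pre_walk_json_string_py (pvDiffWitness_walk_json_string_py.1) (pvDiffWitness_walk_json_string_py.2) ∧ D_walk_json_string_py (pvDiffWitness_walk_json_string_py.1) (pvDiffWitness_walk_json_string_py.2) ∧ walk_json_string_py (pvDiffWitness_walk_json_string_py.1) (pvDiffWitness_walk_json_string_py.2) = pvDiffWitnessOut_walk_json_string_py.1 ∧ walk_json_string_py_alt (pvDiffWitness_walk_json_string_py.1) (pvDiffWitness_walk_json_string_py.2) = pvDiffWitnessOut_walk_json_string_py.2 ∧ pvDiffWitnessOut_walk_json_string_py.1 ≠ pvDiffWitnessOut_walk_json_string_py.2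

-- ===== LEMMAS AND PROOFS =====

lemma pv_singleton_infix {c : Char} {l : List Char} : [c] <:+: l ↔ c ∈ l := by
  constructor
  · intro h; exact List.singleton_sublist.1 h.sublist
  · intro h
    obtain ⟨s, u, rfl⟩ := List.append_of_mem h
    exact ⟨s, u, by simp⟩

lemma pv_find_nil (c : Char) : PySem.Chars.find [] [c] = -1 := by
  rw [PySem.Chars.find_eq_neg_one_iff]
  exact fun h => by simpa using pv_singleton_infix.1 h

lemma pv_find_cons_self (c : Char) (l : List Char) : PySem.Chars.find (c :: l) [c] = 0 := by
  have hinf : [c] <:+: c :: l := pv_singleton_infix.2 (by simp)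
  have h0 : 0 ≤ PySem.Chars.find (c :: l) [c] := (PySem.Chars.find_nonneg_iff _ _).2 hinf
  obtain ⟨hpre, hmin⟩ := PySem.Chars.find_spec h0
  rcases Nat.eq_zero_or_pos (PySem.Chars.find (c :: l) [c]).toNat with h | h
  · omega
  · exact absurd (by exact ⟨l, by simp⟩) (hmin 0 h)

lemma pv_find_eq {l : List Char} {c : Char} (p : Nat)
    (hp : [c] <+: l.drop p) (hmin : ∀ q < p, ¬ [c] <+: l.drop q) :
    PySem.Chars.find l [c] = p := by
  have hinf : [c] <:+: l := by
    obtain ⟨r, hr⟩ := hp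
    exact ⟨l.take p, r, by rw [List.append_assoc, hr, List.take_append_drop]⟩
  have h0 : 0 ≤ PySem.Chars.find l [c] := (PySem.Chars.find_nonneg_iff _ _).2 hinf
  obtain ⟨hpre, hm⟩ := PySem.Chars.find_spec h0
  have : (PySem.Chars.find l [c]).toNat = p := by
    rcases lt_trichotomy (PySem.Chars.find l [c]).toNat p with h | h | h
    · exact absurd hpre (hmin _ h)
    · exact h
    · exact absurd hp (hm p h)
  omega

lemma pv_find_cons_ne {x c : Char} (l : List Char) (hx : x ≠ c) :
    PySem.Chars.find (x :: l) [c] =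
      if PySem.Chars.find l [c] = -1 then -1 else 1 + PySem.Chars.find l [c] := by
  by_cases hm : c ∈ l
  · have h0 : 0 ≤ PySem.Chars.find l [c] :=
      (PySem.Chars.find_nonneg_iff _ _).2 (pv_singleton_infix.2 hm)
    obtain ⟨hpre, hmin⟩ := PySem.Chars.find_spec h0
    have hne : PySem.Chars.find l [c] ≠ -1 := by omega
    rw [if_neg hne]
    have heq : PySem.Chars.find (x :: l) [c] = ((PySem.Chars.find l [c]).toNat + 1 : Nat) := by
      apply pv_find_eq
      · simpa using hpre
      · intro q hq
        cases q with
        | zero =>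
          intro hc
          obtain ⟨r, hr⟩ := hc
          simp at hr
          exact hx hr.1.symm
        | succ q' =>
          simpa using hmin q' (by omega)
    rw [heq]; push_cast; omega
  · have h1 : PySem.Chars.find l [c] = -1 :=
      (PySem.Chars.find_eq_neg_one_iff _ _).2 (fun h => hm (pv_singleton_infix.1 h))
    rw [if_pos h1, PySem.Chars.find_eq_neg_one_iff]
    intro h
    rcases List.mem_cons.1 (pv_singleton_infix.1 h) with h' | h'
    · exact hx h'.symm
    · exact hm h'

lemma pv_findFrom_self {t : List Char} {k : Nat} {c : Char} (hk : k < t.length)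
    (hc : t[k] = c) : PySem.Chars.findFrom t [c] (k : Int) none = (k : Int) := by
  rw [PySem.Chars.findFrom_natCast t [c] k hk.le, List.drop_eq_getElem_cons hk, hc,
    pv_find_cons_self]
  simp

lemma pv_findFrom_succ {t : List Char} {k : Nat} {c : Char} (hk : k < t.length)
    (hc : t[k] ≠ c) :
    PySem.Chars.findFrom t [c] (k : Int) none = PySem.Chars.findFrom t [c] ((k + 1 : Nat) : Int) none := by
  rw [PySem.Chars.findFrom_natCast t [c] k hk.le,
    PySem.Chars.findFrom_natCast t [c] (k + 1) (by omega),
    List.drop_eq_getElem_cons hk, pv_find_cons_ne _ hc]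
  have := PySem.Chars.neg_one_le_find (t.drop (k + 1)) [c]
  split_ifs <;> omega

lemma pv_findFrom_len {t : List Char} {c : Char} :
    PySem.Chars.findFrom t [c] (t.length : Int) none = -1 := by
  rw [PySem.Chars.findFrom_natCast t [c] t.length le_rfl]
  simp [List.drop_length, pv_find_nil]

lemma pv_findFrom_ge {t : List Char} {k : Nat} {c : Char} (hk : k ≤ t.length)
    (h : PySem.Chars.findFrom t [c] (k : Int) none ≠ -1) :
    (k : Int) ≤ PySem.Chars.findFrom t [c] (k : Int) none := by
  rw [PySem.Chars.findFrom_natCast t [c] k hk] at h ⊢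
  have := PySem.Chars.neg_one_le_find (t.drop k) [c]
  split_ifs at h ⊢ <;> omega

-- B skips a non-delimiter character: scanning from k equals scanning from k+1 with t[k] copied.
lemma pv_skipB (t : List Char) (f : Nat) (k : Nat) (acc : List Char)
    (hk : k < t.length) (h1 : t[k] ≠ '\\') (h2 : t[k] ≠ '"') :
    pvWalkB t (f + 1) (k : Int) acc = pvWalkB t (f + 1) ((k + 1 : Nat) : Int) (acc ++ [t[k]]) := by
  have hb := pv_findFrom_succ hk h1
  have hq := pv_findFrom_succ hk h2
  have gk : ((k : Nat) : Int) < (t.length : Int) := by exact_mod_cast hk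
  by_cases hk1 : k + 1 < t.length
  · have gk1 : ((k + 1 : Nat) : Int) < (t.length : Int) := by exact_mod_cast hk1
    have hsl : ∀ j : Int, (k : Int) + 1 ≤ j →
        acc ++ PySem.List.slice t (some (k : Int)) (some j) =
          (acc ++ [t[k]]) ++ PySem.List.slice t (some ((k + 1 : Nat) : Int)) (some j) := by
      intro j hj
      have h3 : j.toNat - k = (j.toNat - (k + 1)) + 1 := by omega
      rw [PySem.List.slice_toNat t (by omega) (by omega),
        PySem.List.slice_toNat t (by omega) (by omega)]
      simp only [Int.toNat_natCast]
      rw [h3, List.drop_eq_getElem_cons hk, List.take_succ_cons]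
      simp
    have hsln : acc ++ PySem.List.slice t (some (k : Int)) none =
        (acc ++ [t[k]]) ++ PySem.List.slice t (some ((k + 1 : Nat) : Int)) none := by
      rw [PySem.List.slice_from t (by omega), PySem.List.slice_from t (by omega)]
      simp only [Int.toNat_natCast]
      rw [List.drop_eq_getElem_cons hk]
      simp
    rw [pvWalkB, pvWalkB, if_pos gk, if_pos gk1, ← hb, ← hq]
    set jb := PySem.Chars.findFrom t ['\\'] (k : Int) none with hjb
    set jq := PySem.Chars.findFrom t ['"'] (k : Int) none with hjq
    set j : Int := if jb = -1 then jq else if jq = -1 then jb else min jb jq with hj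
    by_cases hjm : j = -1
    · rw [if_pos hjm, if_pos hjm, hsln]
    · have hjge : (k : Int) + 1 ≤ j := by
        have gb : jb ≠ -1 → (k : Int) + 1 ≤ jb := by
          intro hne
          have := pv_findFrom_ge (t := t) (k := k + 1) (c := '\\') (by omega)
            (by rw [← hb] at *; exact hne)
          rw [← hb] at this; push_cast at this ⊢; omega
        have gq : jq ≠ -1 → (k : Int) + 1 ≤ jq := by
          intro hne
          have := pv_findFrom_ge (t := t) (k := k + 1) (c := '"') (by omega)
            (by rw [← hq] at *; exact hne)
          rw [← hq] at this; push_cast at this ⊢; omega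
        rw [hj] at hjm ⊢
        split_ifs at hjm ⊢ with e1 e2
        · exact gq hjm
        · exact gb hjm
        · rcases le_total jb jq with h | h
          · rw [min_eq_left h]; exact gb e1
          · rw [min_eq_right h]; exact gq e2
      rw [if_neg hjm, if_neg hjm, hsl j hjge]
  · have hlen : k + 1 = t.length := by omega
    have gk1 : ¬ (((k + 1 : Nat) : Int) < (t.length : Int)) := by omega
    have hcast : ((k + 1 : Nat) : Int) = (t.length : Int) := by exact_mod_cast hlen
    have hbn : PySem.Chars.findFrom t ['\\'] ((k + 1 : Nat) : Int) none = -1 := by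
      rw [hcast]; exact pv_findFrom_len
    have hqn : PySem.Chars.findFrom t ['"'] ((k + 1 : Nat) : Int) none = -1 := by
      rw [hcast]; exact pv_findFrom_len
    rw [pvWalkB, pvWalkB, if_pos gk, if_neg gk1, hb, hq, hbn, hqn]
    norm_num
    refine ⟨?_, ?_⟩
    · rw [List.drop_eq_getElem_cons hk, hlen, List.drop_length]
    · omega

-- main equivalence for a nonnegative start index, any sufficient fuels
lemma pv_main (t : List Char) : ∀ (fA fB : Nat) (k : Nat) (acc : List Char),
    t.length < k + fA → t.length < k + fB →
    pvWalkA t fA (k : Int) acc = pvWalkB t fB (k : Int) acc := by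
  intro fA
  induction fA with
  | zero =>
    intro fB k acc hA hB
    have hk : ¬ ((k : Int) < (t.length : Int)) := by omega
    cases fB with
    | zero => rfl
    | succ g => rw [pvWalkA, pvWalkB, if_neg hk]
  | succ f ih =>
    intro fB k acc hA hB
    by_cases hk : k < t.length
    · obtain ⟨g, rfl⟩ : ∃ g, fB = g + 1 := ⟨fB - 1, by omega⟩
      have hki : ((k : Int)) < (t.length : Int) := by exact_mod_cast hk
      have hkne : ((k : Int)) ≠ -1 := by omega
      have hch : PySem.List.pyGetD t (k : Int) ' ' = t[k] := by
        rw [PySem.List.pyGetD_eq_getElem t ' ' (by omega) (by exact_mod_cast hk)]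
        congr 1
      by_cases hq : t[k] = '"'
      · -- A returns (acc, k+1); B finds j = k and returns the same
        have hjq := pv_findFrom_self hk hq
        have hjbk : PySem.Chars.findFrom t ['\\'] (k : Int) none ≠ -1 →
            (k : Int) ≤ PySem.Chars.findFrom t ['\\'] (k : Int) none :=
          fun h => pv_findFrom_ge hk.le h
        have hjeq : (if PySem.Chars.findFrom t ['\\'] (k : Int) none = -1 then
            PySem.Chars.findFrom t ['"'] (k : Int) none
          else if PySem.Chars.findFrom t ['"'] (k : Int) none = -1 then
            PySem.Chars.findFrom t ['\\'] (k : Int) none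
          else min (PySem.Chars.findFrom t ['\\'] (k : Int) none)
            (PySem.Chars.findFrom t ['"'] (k : Int) none)) = (k : Int) := by
          rw [hjq]
          by_cases e1 : PySem.Chars.findFrom t ['\\'] (k : Int) none = -1
          · rw [if_pos e1]
          · rw [if_neg e1, if_neg hkne]
            have := hjbk e1
            omega
        have hAcond : ¬ (PySem.List.pyGetD t (k : Int) ' ' = '\\' ∧ (k : Int) + 1 < (t.length : Int)) := by
          rw [hch, hq]; rintro ⟨h, -⟩; exact absurd h (by decide)
        have hq' : PySem.List.pyGetD t (k : Int) ' ' = '"' := by rw [hch]; exact hq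
        simp only [pvWalkA, pvWalkB]
        rw [if_pos hki, if_pos hki, if_neg hAcond, if_pos hq', hjeq, if_neg hkne,
          PySem.List.slice_toNat t (by omega) (by omega)]
        simp only [Int.toNat_natCast, Nat.sub_self, List.take_zero, List.append_nil]
        rw [if_pos hq']
      · by_cases hbs : t[k] = '\\'
        · -- delimiter backslash: j = k, acc' = acc, then identical dispatch
          have hjb := pv_findFrom_self hk hbs
          have hjqk : PySem.Chars.findFrom t ['"'] (k : Int) none ≠ -1 →
              (k : Int) ≤ PySem.Chars.findFrom t ['"'] (k : Int) none :=
            fun h => pv_findFrom_ge hk.le h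
          have hjeq : (if PySem.Chars.findFrom t ['\\'] (k : Int) none = -1 then
              PySem.Chars.findFrom t ['"'] (k : Int) none
            else if PySem.Chars.findFrom t ['"'] (k : Int) none = -1 then
              PySem.Chars.findFrom t ['\\'] (k : Int) none
            else min (PySem.Chars.findFrom t ['\\'] (k : Int) none)
              (PySem.Chars.findFrom t ['"'] (k : Int) none)) = (k : Int) := by
            rw [hjb, if_neg hkne]
            by_cases e2 : PySem.Chars.findFrom t ['"'] (k : Int) none = -1
            · rw [if_pos e2]
            · rw [if_neg e2]
              have := hjqk e2
              omega
          have hnq : ¬ PySem.List.pyGetD t (k : Int) ' ' = '"' := by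
            rw [hch, hbs]; decide
          simp only [pvWalkA, pvWalkB]
          rw [if_pos hki, if_pos hki, hjeq, if_neg hkne,
            PySem.List.slice_toNat t (by omega) (by omega)]
          simp only [Int.toNat_natCast, Nat.sub_self, List.take_zero, List.append_nil]
          rw [if_neg hnq, if_neg hnq]
          by_cases hk1 : (k : Int) + 1 < (t.length : Int)
          · have hAc : PySem.List.pyGetD t (k : Int) ' ' = '\\' ∧ (k : Int) + 1 < (t.length : Int) :=
              ⟨by rw [hch]; exact hbs, hk1⟩
            rw [if_pos hAc, if_pos hk1]
            have hrec : ∀ x : List Char, pvWalkA t f ((k : Int) + 2) (acc ++ x) =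
                pvWalkB t g ((k : Int) + 2) (acc ++ x) := by
              intro x
              rw [show ((k : Int)) + 2 = ((k + 2 : Nat) : Int) by push_cast; ring]
              exact ih g (k + 2) (acc ++ x) (by omega) (by omega)
            set nxt := PySem.List.pyGetD t ((k : Int) + 1) ' ' with hnxt
            by_cases e1 : nxt = '"'
            · rw [if_pos e1, if_pos (Or.inl e1), e1]; exact hrec _
            · rw [if_neg e1]
              by_cases e2 : nxt = '\\'
              · rw [if_pos e2, if_pos (Or.inr (Or.inl e2)), e2]; exact hrec _
              · rw [if_neg e2]
                by_cases e3 : nxt = '/'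
                · rw [if_pos e3, if_pos (Or.inr (Or.inr e3)), e3]; exact hrec _
                · rw [if_neg e3, if_neg (show ¬ (nxt = '"' ∨ nxt = '\\' ∨ nxt = '/') by
                    rintro (h | h | h) <;> [exact e1 h; exact e2 h; exact e3 h])]
                  by_cases e4 : nxt = 'n'
                  · rw [if_pos e4, if_pos e4]; exact hrec _
                  · rw [if_neg e4, if_neg e4]
                    by_cases e5 : nxt = 'r'
                    · rw [if_pos e5, if_pos e5]; exact hrec _
                    · rw [if_neg e5, if_neg e5]
                      by_cases e6 : nxt = 't'
                      · rw [if_pos e6, if_pos e6]; exact hrec _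
                      · rw [if_neg e6, if_neg e6]
                        by_cases e7 : nxt = 'b' ∨ nxt = 'f'
                        · by_cases e8 : (k : Int) + 2 < (t.length : Int) ∧
                              PySem.Chars.isalpha (PySem.List.pyGetD t ((k : Int) + 2) ' ') = true
                          · rw [if_pos ⟨e7, e8⟩, if_pos e7, if_pos e8]; exact hrec _
                          · rw [if_neg (show ¬ ((nxt = 'b' ∨ nxt = 'f') ∧ _) by
                              rintro ⟨-, h⟩; exact e8 h), if_pos e7, if_neg e8]
                            rcases e7 with e7 | e7
                            · rw [if_pos e7, if_pos e7]; exact hrec _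
                            · have hnb : nxt ≠ 'b' := by rw [e7]; decide
                              rw [if_neg hnb, if_neg hnb, if_pos e7]
                              exact hrec _
                        · rw [if_neg (show ¬ ((nxt = 'b' ∨ nxt = 'f') ∧ _) by
                            rintro ⟨h, -⟩; exact e7 h), if_neg e7,
                            if_neg (fun h => e7 (Or.inl h)), if_neg (fun h => e7 (Or.inr h))]
                          exact hrec _
          · rw [if_neg (show ¬ (PySem.List.pyGetD t (k : Int) ' ' = '\\' ∧ (k : Int) + 1 < (t.length : Int)) by
              rintro ⟨-, h⟩; exact hk1 h), if_neg hk1, hch, hbs]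
            rw [show ((k : Int)) + 1 = ((k + 1 : Nat) : Int) by push_cast; ring]
            exact ih g (k + 1) (acc ++ ['\\']) (by omega) (by omega)
        · -- ordinary character
          rw [pvWalkA, if_pos hki, hch,
            if_neg (show ¬ (t[k] = '\\' ∧ (k : Int) + 1 < (t.length : Int)) by
              rintro ⟨h, -⟩; exact hbs h), if_neg hq]
          rw [show ((k : Int)) + 1 = ((k + 1 : Nat) : Int) by push_cast; ring]
          rw [ih (g + 1) (k + 1) (acc ++ [t[k]]) (by omega) (by omega)]
          exact (pv_skipB t g k acc hk hbs hq).symm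
    · have hki : ¬ ((k : Int) < (t.length : Int)) := by omega
      cases fB with
      | zero => rw [pvWalkA, pvWalkB, if_neg hki]
      | succ g => rw [pvWalkA, pvWalkB, if_neg hki, if_neg hki]

-- ===== VERDICT (by name: the statement is the Claim_ definition above) =====
theorem walk_json_string_py_spec : Claim_unchanged_walk_json_string_py := by
  intro text start _ hpre hnd
  unfold Pre_walk_json_string_py at hpre
  unfold D_walk_json_string_py at hnd
  rw [show PySem.Str.len text = (text.toList.length : Int) by simp [PySem.Str.len_eq]] at hpre hnd
  have hs : 0 ≤ start := by
    by_contra h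
    exact hnd ⟨by omega, by omega⟩
  have hk : start = ((start.toNat : Nat) : Int) := by omega
  simp only [walk_json_string_py, walk_json_string_py_alt]
  rw [hk, pv_main text.toList
    (((text.toList.length : Int) - ((start.toNat : Nat) : Int)).toNat + 1)
    (((text.toList.length : Int) - ((start.toNat : Nat) : Int)).toNat + 1)
    start.toNat [] (by omega) (by omega)]
theorem walk_json_string_py_changed : Claim_changed_walk_json_string_py := by
  unfold Claim_changed_walk_json_string_py; decide
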